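-- pv_equiv track=rewrite | github.com/Vinix24/vnx-orchestration | scripts/f39/context_assembler.py | _extract_active_feature_section
-- ===== SOURCE A (Python) =====
-- def _extract_active_feature_section(feature_plan_text: str) -> str:
--     """Extract the first in-progress or active feature block from FEATURE_PLAN.md."""
--     lines = feature_plan_text.splitlines()
--     in_section = False
--     section_lines: list[str] = []
--     for line in lines:
--         # Feature headings are typically ## F<N> or # F<N>
--         if line.startswith("## ") or line.startswith("# "):
--             if in_section:
--                 break  # We captured one complete section
--             # Look for markers indicating active work
--             lower = line.lower()
--             if any(kw in lower for kw in ("in progress", "active", "wip", "current")):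
--                 in_section = True
--                 section_lines.append(line)
--         elif in_section:
--             section_lines.append(line)
--
--     if section_lines:
--         return "\n".join(section_lines)
--
--     # Fallback: return first 50 lines
--     return "\n".join(lines[:50])
-- ===== SOURCE B (Python) =====
-- def _extract_active_feature_section(feature_plan_text: str) -> str:
--     """Locate boundaries of the first active feature section, then slice."""
--     lines = feature_plan_text.splitlines()
--     start = next(
--         (i for i, line in enumerate(lines)
--          if (line.startswith("## ") or line.startswith("# "))
--          and any(kw in line.lower() for kw in ("in progress", "active", "wip", "current"))),
--         None,
--     )
--     if start is None:
--         return "\n".join(lines[:50])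
--     end = next(
--         (j for j in range(start + 1, len(lines))
--          if lines[j].startswith("## ") or lines[j].startswith("# ")),
--         len(lines),
--     )
--     return "\n".join(lines[start:end])
-- ===== Notes on version B (the rewrite author's own statement) =====
-- stated objective: alternative
-- what changed: Replaces A's single stateful scan (in_section flag plus accumulating section_lines with a break) by locate-boundaries-then-slice: find the index of the first active heading, find the next heading after it, and join the slice lines[start:end].
import Mathlib
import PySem

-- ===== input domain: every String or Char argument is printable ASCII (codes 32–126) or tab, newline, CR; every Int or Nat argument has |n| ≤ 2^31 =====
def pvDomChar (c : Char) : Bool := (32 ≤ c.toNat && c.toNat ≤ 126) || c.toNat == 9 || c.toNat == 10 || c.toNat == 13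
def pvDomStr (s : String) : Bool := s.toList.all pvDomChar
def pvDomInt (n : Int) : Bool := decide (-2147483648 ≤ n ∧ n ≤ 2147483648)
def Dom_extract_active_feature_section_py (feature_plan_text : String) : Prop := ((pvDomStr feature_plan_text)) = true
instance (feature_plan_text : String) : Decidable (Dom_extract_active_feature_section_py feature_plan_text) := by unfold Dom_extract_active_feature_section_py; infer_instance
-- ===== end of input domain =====

-- B replaces A's stateful accumulate-while-scanning loop by locate-boundaries-then-slice (objective: alternative decomposition, same cost).

-- ===== PORT A =====
-- shared string tests (the literal conditions both Python versions spell out inline)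
def pvIsHeading (line : String) : Bool :=
  PySem.Str.startswith line "## " || PySem.Str.startswith line "# "

def pvIsActive (line : String) : Bool :=
  let lower := PySem.Str.lower line
  PySem.Str.isIn "in progress" lower || PySem.Str.isIn "active" lower ||
    PySem.Str.isIn "wip" lower || PySem.Str.isIn "current" lower

-- A's for-loop with in_section / section_lines state and break
def pvLoopA : List String → Bool → List String → List String
  | [], _, acc => acc
  | line :: rest, inSection, acc =>
    if pvIsHeading line then
      if inSection then acc  -- break
      else if pvIsActive line then pvLoopA rest true (acc ++ [line])
      else pvLoopA rest inSection acc
    else if inSection then pvLoopA rest inSection (acc ++ [line])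
    else pvLoopA rest inSection acc

def extract_active_feature_section_py (feature_plan_text : String) : String :=
  let lines := PySem.Str.splitlines feature_plan_text
  let sectionLines := pvLoopA lines false []
  if sectionLines.isEmpty then
    PySem.Str.join "\n" (PySem.List.slice lines none (some 50))  -- "\n".join(lines[:50])
  else
    PySem.Str.join "\n" sectionLines

-- ===== PORT B =====
def extract_active_feature_section_py_alt (feature_plan_text : String) : String :=
  let lines := PySem.Str.splitlines feature_plan_text
  match lines.findIdx? (fun l => pvIsHeading l && pvIsActive l) with
  | none => PySem.Str.join "\n" (PySem.List.slice lines none (some 50))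
  | some start =>
    -- next heading after start (default len(lines))
    let stop := match (lines.drop (start + 1)).findIdx? pvIsHeading with
      | none => lines.length
      | some k => start + 1 + k
    -- lines[start:stop] with 0 ≤ start ≤ stop ≤ len(lines)
    PySem.Str.join "\n" ((lines.take stop).drop start)

-- ===== PRECONDITION & SPEC =====
def Spec_extract_active_feature_section_py (feature_plan_text : String) (out : String) : Prop := out = extract_active_feature_section_py_alt feature_plan_text
instance (feature_plan_text : String) (out : String) : Decidable (Spec_extract_active_feature_section_py feature_plan_text out) := by unfold Spec_extract_active_feature_section_py; infer_instance

-- ===== CLAIM (what is proved, stated in full; the proofs are below) =====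
def Claim_equal_extract_active_feature_section_py : Prop := ∀ (feature_plan_text : String), Dom_extract_active_feature_section_py feature_plan_text → Spec_extract_active_feature_section_py feature_plan_text (extract_active_feature_section_py feature_plan_text)

-- ===== LEMMAS AND PROOFS =====

-- capture phase: once in_section, A collects lines up to (excluding) the next heading
lemma pvLoopA_true (xs : List String) (acc : List String) :
    pvLoopA xs true acc = acc ++ xs.takeWhile (fun l => !pvIsHeading l) := by
  induction xs generalizing acc with
  | nil => simp [pvLoopA]
  | cons x rest ih =>
    by_cases h : pvIsHeading x = true <;> simp [pvLoopA, h, ih]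

-- search phase: A skips lines until the first active heading, then captures
lemma pvLoopA_false (xs : List String) :
    pvLoopA xs false [] =
      match xs.findIdx? (fun l => pvIsHeading l && pvIsActive l) with
      | none => []
      | some s => (xs.drop s).take 1 ++ (xs.drop (s + 1)).takeWhile (fun l => !pvIsHeading l) := by
  induction xs with
  | nil => simp [pvLoopA]
  | cons x rest ih =>
    by_cases hh : pvIsHeading x = true
    · by_cases ha : pvIsActive x = true
      · simp [pvLoopA, hh, ha, List.findIdx?_cons, pvLoopA_true]
      · simp [pvLoopA, hh, ha, List.findIdx?_cons, ih]
        cases rest.findIdx? (fun l => pvIsHeading l && pvIsActive l) <;> simp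
    · simp [pvLoopA, hh, List.findIdx?_cons, ih]
      cases rest.findIdx? (fun l => pvIsHeading l && pvIsActive l) <;> simp

-- takeWhile (¬p) is the prefix up to the first index where p holds
lemma pvTakeWhile_findIdx? {α : Type} (p : α → Bool) (xs : List α) :
    xs.takeWhile (fun x => !p x) =
      match xs.findIdx? p with
      | none => xs
      | some k => xs.take k := by
  induction xs with
  | nil => simp
  | cons x rest ih =>
    by_cases h : p x = true
    · simp [h, List.findIdx?_cons]
    · simp [h, List.findIdx?_cons, ih]
      cases rest.findIdx? p <;> simp

-- ===== VERDICT (by name: the statement is the Claim_ definition above) =====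
theorem extract_active_feature_section_py_spec : Claim_equal_extract_active_feature_section_py := by
  intro t _
  unfold Spec_extract_active_feature_section_py
  simp only [extract_active_feature_section_py, extract_active_feature_section_py_alt]
  set lines := PySem.Str.splitlines t with hl
  rw [pvLoopA_false]
  cases hfi : lines.findIdx? (fun l => pvIsHeading l && pvIsActive l) with
  | none => simp
  | some s =>
    have hs : s < lines.length := (List.findIdx?_eq_some_iff_findIdx_eq.mp hfi).1
    have hdrop : lines.drop s = lines[s] :: lines.drop (s + 1) :=
      List.drop_eq_getElem_cons hs
    dsimp only
    simp only [pvTakeWhile_findIdx?]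
    cases hfe : (lines.drop (s + 1)).findIdx? pvIsHeading with
    | none =>
      simp only [List.take_length]
      rw [hdrop]
      simp
      intro h
      exact absurd hs (Nat.not_lt.mpr h)
    | some k =>
      simp only [List.drop_take]
      have h2 : s + 1 + k - s = k + 1 := by omega
      rw [h2, hdrop, List.take_succ_cons]
      simp
      rw [hdrop, List.take_succ_cons]
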